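-- pv_equiv track=rewrite | github.com/theoricien/Python | sdfqsr.py | word_without_quotes
-- ===== SOURCE A (Python) =====
-- def word_without_quotes(string,n):
--     s = ''
--     for i in range(n,len(string)):
--         if string[i] == ' ':
--             return s
--         if string[i] == '"' or string[i] == '\n':
--             continue
--         s+=string[i]
--     return s
-- ===== SOURCE B (Python) =====
-- def word_without_quotes(string, n):
--     end = string.find(' ', n)
--     if end == -1:
--         end = len(string)
--     word = string[n:end]
--     return word.replace('"', '').replace('\n', '')
-- ===== Notes on version B (the rewrite author's own statement) =====
-- stated objective: simpler
-- what changed: A's single accumulating character loop with early return is replaced by a two-stage computation: find the space delimiter with str.find, slice the word out, then strip quotes and newlines with two replace calls; Pre_ restricts to n >= 0 because for n < -len A raises IndexError and for -len <= n < 0 A's value is an accidental negative-index wraparound (the loop walks the tail and then the whole string again) that no caller would specify, while B follows Python's standard find/slice convention there.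
-- outside the precondition, e.g. on word_without_quotes('ab', -1): A returns 'bab', B returns 'b'; on word_without_quotes('ab', -2): A returns 'abab', B returns 'ab'
import Mathlib
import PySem

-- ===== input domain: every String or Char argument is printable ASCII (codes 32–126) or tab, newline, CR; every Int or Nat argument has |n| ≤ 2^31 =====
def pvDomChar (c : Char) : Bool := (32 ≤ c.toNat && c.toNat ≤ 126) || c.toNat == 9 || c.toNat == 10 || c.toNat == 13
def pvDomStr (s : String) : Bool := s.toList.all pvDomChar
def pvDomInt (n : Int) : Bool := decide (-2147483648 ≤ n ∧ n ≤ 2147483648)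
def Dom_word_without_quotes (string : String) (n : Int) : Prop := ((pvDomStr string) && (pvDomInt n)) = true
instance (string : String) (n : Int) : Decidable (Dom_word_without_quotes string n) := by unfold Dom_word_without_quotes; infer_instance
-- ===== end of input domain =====

-- B replaces A's per-character accumulating loop by a two-stage computation: find the space
-- delimiter, slice the word out, then strip '"' and '\n' with replace (objective: simpler).

-- ===== PORT A =====
-- the for-loop of A: iterate over the index list, early return on ' ', skip '"'/'\n', else append
def wwqLoopA (cs : List Char) (idxs : List Int) (s : List Char) : List Char :=
  match idxs with
  | [] => s
  | i :: rest =>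
    match PySem.List.pyGet? cs i with
    | none => s      -- Python raises IndexError here; unreachable under Pre_ (0 ≤ n)
    | some c =>
      if c = ' ' then s
      else if c = '"' ∨ c = '\n' then wwqLoopA cs rest s
      else wwqLoopA cs rest (s ++ [c])

def word_without_quotes (string : String) (n : Int) : String :=
  String.ofList (wwqLoopA string.toList (PySem.List.pyRange n (string.toList.length : Int) 1) [])

-- ===== PORT B =====
def word_without_quotes_alt (string : String) (n : Int) : String :=
  let e := PySem.Str.findFrom string " " n
  let e := if e = -1 then PySem.Str.len string else e
  let word := PySem.Str.slice string (some n) (some e)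
  PySem.Str.replace (PySem.Str.replace word "\"" "") "\n" ""

-- ===== PRECONDITION & SPEC =====
-- Pre_ restricts to the natural domain n ≥ 0: for n < -len(string) A raises IndexError, and for
-- -len(string) ≤ n < 0 A's value is an accident of negative-index wraparound (the loop walks the
-- tail and then the whole string again), a corner no caller would specify; B uses Python's
-- standard find/slice convention there.
def Pre_word_without_quotes (string : String) (n : Int) : Prop := 0 ≤ n
instance (string : String) (n : Int) : Decidable (Pre_word_without_quotes string n) := by unfold Pre_word_without_quotes; infer_instance

def pvWitness_word_without_quotes : String × Int := ("ab \"cd\"\ne", 0)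

def Spec_word_without_quotes (string : String) (n : Int) (out : String) : Prop := out = word_without_quotes_alt string n
instance (string : String) (n : Int) (out : String) : Decidable (Spec_word_without_quotes string n out) := by unfold Spec_word_without_quotes; infer_instance

-- ===== CLAIM (what is proved, stated in full; the proofs are below) =====
def Claim_equal_word_without_quotes : Prop := ∀ (string : String) (n : Int), Dom_word_without_quotes string n → Pre_word_without_quotes string n → Spec_word_without_quotes string n (word_without_quotes string n)

-- ===== LEMMAS AND PROOFS =====

-- the common normal form: take up to the first space, then drop the quotes, then the newlines
def wwqGood (ds : List Char) : List Char :=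
  ((ds.takeWhile (fun c => c ≠ ' ')).filter (fun c => c ≠ '"')).filter (fun c => c ≠ '\n')

theorem wwqLoopA_eq (cs : List Char) (k : Nat) (s : List Char) :
    wwqLoopA cs (PySem.List.pyRange (k : Int) (cs.length : Int) 1) s = s ++ wwqGood (cs.drop k) := by
  induction hm : cs.length - k generalizing k s with
  | zero =>
    have hk : cs.length ≤ k := by omega
    rw [PySem.List.pyRange_one_eq_nil (by exact_mod_cast hk), List.drop_eq_nil_of_le hk]
    simp [wwqLoopA, wwqGood]
  | succ m ih =>
    have hk : k < cs.length := by omega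
    have hdrop : List.drop k cs = cs[k] :: List.drop (k+1) cs := List.drop_eq_getElem_cons hk
    have hcast : ((k : Int) + 1) = ((k + 1 : Nat) : Int) := by push_cast; ring
    rw [PySem.List.pyRange_one_cons (by exact_mod_cast hk)]
    simp only [wwqLoopA, PySem.List.pyGet?_natCast, List.getElem?_eq_getElem hk, hcast]
    by_cases hsp : cs[k] = ' '
    · simp [hsp, hdrop, wwqGood]
    · have hg : wwqGood (List.drop k cs) =
          (if cs[k] = '"' ∨ cs[k] = '\n' then [] else [cs[k]]) ++ wwqGood (List.drop (k+1) cs) := by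
        rw [hdrop]
        generalize List.drop (k+1) cs = t
        by_cases hq : cs[k] = '"' ∨ cs[k] = '\n'
        · rcases hq with h | h <;> simp [wwqGood, hsp, h]
        · obtain ⟨h1, h2⟩ := not_or.mp hq
          simp [wwqGood, hsp, h1, h2, hq]
      by_cases hq : cs[k] = '"' ∨ cs[k] = '\n'
      · rw [if_neg hsp, if_pos hq, ih (k+1) s (by omega), hg, if_pos hq]
        simp
      · rw [if_neg hsp, if_neg hq, ih (k+1) (s ++ [cs[k]]) (by omega), hg, if_neg hq]
        simp

theorem word_without_quotes_eq (string : String) (n : Int) (hn : 0 ≤ n) :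
    (word_without_quotes string n).toList = wwqGood (string.toList.drop n.toNat) := by
  unfold word_without_quotes
  rw [show n = ((n.toNat : Nat) : Int) by omega]
  rw [wwqLoopA_eq string.toList n.toNat []]
  simp
  rw [show max n 0 = n from by omega]

theorem find_go_single (c : Char) (ds : List Char) (k : Nat) :
    PySem.Chars.find.go [c] ds k =
      if c ∈ ds then ((k + (ds.takeWhile (fun x => x ≠ c)).length : Nat) : Int) else -1 := by
  induction ds generalizing k with
  | nil => simp [PySem.Chars.find.go]
  | cons d t ih =>
    by_cases hd : c = d
    · subst hd
      simp [PySem.Chars.find.go, List.isPrefixOf, List.takeWhile_cons]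
    · have : ¬ [c].isPrefixOf (d :: t) := by simp [List.isPrefixOf, hd]
      rw [show PySem.Chars.find.go [c] (d :: t) k = PySem.Chars.find.go [c] t (k+1) by
        simp [PySem.Chars.find.go, this]]
      rw [ih (k+1)]
      by_cases hm : c ∈ t <;>
        simp [hm, hd, Ne.symm hd, List.takeWhile_cons] <;> push_cast <;> ring

theorem find_single (c : Char) (ds : List Char) :
    PySem.Chars.find ds [c] =
      if c ∈ ds then (((ds.takeWhile (fun x => x ≠ c)).length : Nat) : Int) else -1 := by
  rw [PySem.Chars.find, find_go_single]
  simp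

theorem replace_go_single (c : Char) (fuel : Nat) (l acc : List Char) (h : l.length ≤ fuel) :
    PySem.Chars.replace.go [c] [] fuel l acc = acc.reverse ++ l.filter (fun x => x ≠ c) := by
  induction l generalizing fuel acc with
  | nil => cases fuel <;> simp [PySem.Chars.replace.go]
  | cons d t ih =>
    cases fuel with
    | zero => simp at h
    | succ f =>
      by_cases hd : c = d
      · subst hd
        have hp : [c].isPrefixOf (c :: t) = true := by simp [List.isPrefixOf]
        rw [show PySem.Chars.replace.go [c] [] (f+1) (c :: t) acc
            = PySem.Chars.replace.go [c] [] f t acc by simp [PySem.Chars.replace.go, hp]]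
        rw [ih f acc (by simpa using h)]
        simp
      · have hp : ¬ [c].isPrefixOf (d :: t) := by simp [List.isPrefixOf, hd]
        rw [show PySem.Chars.replace.go [c] [] (f+1) (d :: t) acc
            = PySem.Chars.replace.go [c] [] f t (d :: acc) by simp [PySem.Chars.replace.go, hp]]
        rw [ih f (d :: acc) (by simpa using h)]
        simp [Ne.symm hd]

theorem replace_single (c : Char) (ds : List Char) :
    PySem.Chars.replace ds [c] [] = ds.filter (fun x => x ≠ c) := by
  rw [PySem.Chars.replace]
  simp [replace_go_single c ds.length ds [] le_rfl]

theorem word_without_quotes_alt_eq (string : String) (n : Int) (hn : 0 ≤ n) :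
    (word_without_quotes_alt string n).toList = wwqGood (string.toList.drop n.toNat) := by
  unfold word_without_quotes_alt
  simp only [PySem.Str.findFrom_eq, PySem.Str.len_eq, PySem.Str.toList_replace, PySem.Str.toList_slice]
  have hsub : (" " : String).toList = [' '] := by decide
  have hq : ("\"" : String).toList = ['"'] := by decide
  have hnl : ("\n" : String).toList = ['\n'] := by decide
  have hemp : ("" : String).toList = [] := by decide
  rw [hsub, hq, hnl, hemp]
  set cs := string.toList with hcs
  have hff : PySem.Chars.findFrom cs [' '] n none =
      if (cs.length : Int) < n then -1
      else if ' ' ∈ cs.drop n.toNat then n + (((cs.drop n.toNat).takeWhile (fun x => x ≠ ' ')).length : Int)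
      else -1 := by
    rw [PySem.Chars.findFrom]
    have h0 : ¬ n < 0 := by omega
    simp only [h0, if_false, Int.toNat_natCast, List.take_length]
    by_cases hL : (cs.length : Int) < n
    · simp [hL]
    · rw [if_neg hL, if_neg hL, find_single ' ' (List.drop n.toNat cs)]
      by_cases hm : ' ' ∈ cs.drop n.toNat
      · simp [hm]
      · simp [hm]
  rw [hff]
  have htake : ∀ (l : List Char) (p : Char → Bool), l.take (l.takeWhile p).length = l.takeWhile p := by
    intro l p
    have h : List.takeWhile p l <+: l := ⟨List.dropWhile p l, List.takeWhile_append_dropWhile⟩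
    exact (List.prefix_iff_eq_take.mp h).symm
  by_cases hL : (cs.length : Int) < n
  · have hdrop : cs.drop n.toNat = [] := List.drop_eq_nil_of_le (by omega)
    simp only [hL, if_true, PySem.Chars.slice,
      PySem.List.slice_toNat cs hn (by positivity : (0:Int) ≤ (cs.length:Int)), hdrop]
    simp [replace_single, wwqGood]
  · by_cases hm : ' ' ∈ cs.drop n.toNat
    · set tw := (cs.drop n.toNat).takeWhile (fun x => x ≠ ' ') with htw
      have hne : ¬ (n + (tw.length : Int) = -1) := by omega
      simp only [hL, if_false, hm, if_true, if_neg hne, PySem.Chars.slice,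
        PySem.List.slice_toNat cs hn (by omega : (0:Int) ≤ n + (tw.length : Int))]
      have harith : (n + (tw.length : Int)).toNat - n.toNat = tw.length := by omega
      rw [harith, htw, htake, replace_single, replace_single]
      rfl
    · have hall : (cs.drop n.toNat).takeWhile (fun x => x ≠ ' ') = cs.drop n.toNat := by
        refine List.takeWhile_eq_self_iff.mpr ?_
        intro x hx
        simp only [decide_eq_true_eq]
        exact fun hsp => hm (hsp ▸ hx)
      simp only [hL, if_false, hm, if_true, PySem.Chars.slice,
        PySem.List.slice_toNat cs hn (by positivity : (0:Int) ≤ (cs.length:Int))]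
      have hdroptake : List.take ((cs.length:Int).toNat - n.toNat) (cs.drop n.toNat)
          = cs.drop n.toNat := by
        apply List.take_of_length_le
        simp
      rw [hdroptake, replace_single, replace_single, wwqGood, hall]

-- ===== VERDICT (by name: the statement is the Claim_ definition above) =====
theorem word_without_quotes_spec : Claim_equal_word_without_quotes := by
  intro string n _ hn
  unfold Spec_word_without_quotes
  apply String.toList_inj.mp
  rw [word_without_quotes_eq string n hn, word_without_quotes_alt_eq string n hn]
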